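-- pv_equiv track=rewrite | github.com/AndreaBe99/community_membership_hiding | src/community_algs/baselines/community_hiding/sadden.py | num_comm
-- ===== SOURCE A (Python) =====
-- from typing import List, Set, Tuple
--
-- def num_comm(
--     target_comm: List[int], communities: List[List[int]]
-- ) -> Tuple[int, List]:
--     """
--     Find the communities in which the nodes of the target community are present.
--
--     Parameters
--     ----------
--     target_comm : List[int]
--         Target community, list of nodes
--     communities : List[List[int]]
--         List of communities, each community is a list of nodes
--
--     Returns
--     -------
--     len(uni_comm) : int
--         Number of communities in which the nodes of the target community are present
--     comm_list : List[List[int]]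
--         List of communities in which the nodes of the target community are present
--
--     """
--     uni_comm = []
--     comm_list = []
--     for node in target_comm:
--         for c in communities:
--             if node in c:
--                 comm_list.append(c)
--                 if c not in uni_comm:
--                     uni_comm.append(c)
--                     break
--     return len(uni_comm), comm_list
-- ===== SOURCE B (Python) =====
-- def num_comm(target_comm, communities):
--     # One pass interns each community to the id of its first equal occurrence and
--     # indexes node -> [(community, id), ...]; the main loop then walks only each
--     # target node's hits, deduplicating by integer id.
--     canon = {}   # community tuple -> id of its first equal occurrence
--     index = {}   # node -> list of (community, id) in communities order
--     for i, c in enumerate(communities):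
--         j = canon.setdefault(tuple(c), i)
--         for node in dict.fromkeys(c):
--             index.setdefault(node, []).append((c, j))
--     seen = set()
--     comm_list = []
--     for node in target_comm:
--         for c, j in index.get(node, []):
--             comm_list.append(c)
--             if j in seen:
--                 continue
--             seen.add(j)
--             break
--     return len(seen), comm_list
-- ===== Notes on version B (the rewrite author's own statement) =====
-- stated objective: faster
-- what changed: B precomputes in one pass a node-to-(community,id) index with communities interned to integer ids, then walks only each target node's hits with O(1) id-set dedup, instead of A's scan of all communities (with a linear uni_comm membership test) for every target node; intended as faster, measured ~1.6x at the largest size both finished.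
import Mathlib
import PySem

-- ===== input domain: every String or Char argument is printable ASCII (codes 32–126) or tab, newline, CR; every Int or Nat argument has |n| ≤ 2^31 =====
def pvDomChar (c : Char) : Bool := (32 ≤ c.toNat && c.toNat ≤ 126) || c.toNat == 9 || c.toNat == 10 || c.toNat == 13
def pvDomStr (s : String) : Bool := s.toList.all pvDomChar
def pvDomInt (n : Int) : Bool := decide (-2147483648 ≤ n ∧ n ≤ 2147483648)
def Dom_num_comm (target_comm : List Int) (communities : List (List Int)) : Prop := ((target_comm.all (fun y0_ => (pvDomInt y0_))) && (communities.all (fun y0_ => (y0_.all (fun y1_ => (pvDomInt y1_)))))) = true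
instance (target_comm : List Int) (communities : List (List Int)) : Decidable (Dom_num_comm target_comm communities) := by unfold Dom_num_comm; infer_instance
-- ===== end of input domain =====

-- B replaces A's per-target-node scan of ALL communities by a precomputed node→(community, id) index
-- with communities interned to integer ids; intended as faster (measured ~1.6x at the largest size both finished).

-- ===== PORT A =====
-- A's inner 'for c in communities' loop for one node: appends every hit to comm_list,
-- breaks at the first hit not yet in uni_comm (adding it there).
def numCommInnerA (node : Int) : List (List Int) → List (List Int) → List (List Int) → List (List Int) × List (List Int)
  | [], uni, cl => (uni, cl)
  | c :: rest, uni, cl =>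
    if node ∈ c then
      if c ∈ uni then numCommInnerA node rest uni (cl ++ [c])
      else (uni ++ [c], cl ++ [c])
    else numCommInnerA node rest uni cl

def num_comm (target_comm : List Int) (communities : List (List Int)) : Int × List (List Int) :=
  let st := target_comm.foldl
    (fun (st : List (List Int) × List (List Int)) node => numCommInnerA node communities st.1 st.2)
    ([], [])
  ((st.1.length : Int), st.2)

-- ===== PORT B =====
-- B's first loop: 'for i, c in enumerate(communities): j = canon.setdefault(tuple(c), i);
-- for node in dict.fromkeys(c): index.setdefault(node, []).append((c, j))'.
-- (tuple(c) is represented by c itself; setdefault's return value is read off with get? first;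
-- setdefault+append on the index = Dict.modify.)
def ncBuild (communities : List (List Int)) :
    PySem.Dict (List Int) Int × PySem.Dict Int (List (List Int × Int)) :=
  (PySem.List.enumerate communities 0).foldl
    (fun st p =>
      let j := (st.1.get? p.2).getD p.1
      (st.1.setdefault p.2 p.1,
       (PySem.List.dedup p.2).foldl (fun d node => d.modify node [] (· ++ [(p.2, j)])) st.2))
    (PySem.Dict.empty, PySem.Dict.empty)

-- B's inner loop over one node's (community, id) hits: dedup by integer id.
def numCommInnerB : List (List Int × Int) → PySem.Set Int → List (List Int) → PySem.Set Int × List (List Int)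
  | [], seen, cl => (seen, cl)
  | (c, j) :: rest, seen, cl =>
    if PySem.Set.contains seen j then numCommInnerB rest seen (cl ++ [c])
    else (PySem.Set.add seen j, cl ++ [c])

def num_comm_alt (target_comm : List Int) (communities : List (List Int)) : Int × List (List Int) :=
  let index := (ncBuild communities).2
  let st := target_comm.foldl
    (fun (st : PySem.Set Int × List (List Int)) node =>
      numCommInnerB (index.getD node []) st.1 st.2)
    (PySem.Set.empty, [])
  (PySem.Set.len st.1, st.2)

-- ===== PRECONDITION & SPEC =====
def Spec_num_comm (target_comm : List Int) (communities : List (List Int)) (out : Int × List (List Int)) : Prop := out = num_comm_alt target_comm communities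
instance (target_comm : List Int) (communities : List (List Int)) (out : Int × List (List Int)) : Decidable (Spec_num_comm target_comm communities out) := by unfold Spec_num_comm; infer_instance

-- ===== CLAIM (what is proved, stated in full; the proofs are below) =====
def Claim_equal_num_comm : Prop := ∀ (target_comm : List Int) (communities : List (List Int)), Dom_num_comm target_comm communities → Spec_num_comm target_comm communities (num_comm target_comm communities)

-- ===== LEMMAS AND PROOFS =====

-- the canonical integer id B's `canon` dict assigns to a community value
def ncId (communities : List (List Int)) (c : List Int) : Int := (communities.idxOf c : Int)

lemma ncId_inj (communities : List (List Int)) {c c' : List Int}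
    (hc : c ∈ communities) (hc' : c' ∈ communities) (h : ncId communities c = ncId communities c') :
    c = c' := by
  have h' : communities.idxOf c = communities.idxOf c' := by
    simpa [ncId] using h
  calc c = communities[communities.idxOf c]'(List.idxOf_lt_length_of_mem hc) :=
        (List.getElem_idxOf _).symm
    _ = communities[communities.idxOf c']'(List.idxOf_lt_length_of_mem hc') := by
        simp_rw [h']
    _ = c' := List.getElem_idxOf _

-- helper: filtering a duplicate-free list by equality with `node`
lemma nc_filter_nodup (node : Int) (l : List Int) (h : l.Nodup) :
    l.filter (fun n => n == node) = if node ∈ l then [node] else [] := by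
  induction l with
  | nil => simp
  | cons a t ih =>
    simp only [List.nodup_cons] at h
    by_cases hane : a = node
    · subst hane
      have : List.filter (fun n => n == a) t = [] :=
        List.filter_eq_nil_iff.2 (by intro b hb; simp; rintro rfl; exact h.1 hb)
      simp [this]
    · simp [hane, ih h.2, Ne.symm hane]

-- one community's contribution to the index at key `node` (value `v` appended once iff node ∈ c)
lemma ncIndex_step (d : PySem.Dict Int (List (List Int × Int))) (c : List Int)
    (v : List Int × Int) (node : Int) :
    ((PySem.List.dedup c).foldl (fun d n => d.modify n [] (· ++ [v])) d).getD node []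
      = d.getD node [] ++ (if node ∈ c then [v] else []) := by
  have h1 : ((PySem.List.dedup c).map (fun n => ((n : Int), v))).foldl
        (fun d p => d.modify p.1 [] (· ++ [p.2])) d
      = (PySem.List.dedup c).foldl (fun d n => d.modify n [] (· ++ [v])) d := by
    rw [List.foldl_map]
  rw [← h1, PySem.Dict.getD_foldl_modify_append]
  congr 1
  rw [List.filter_map]
  have h2 : ((fun p => p.1 == node) ∘ fun n => ((n : Int), v)) = fun n => n == node := rfl
  rw [h2, nc_filter_nodup node _ (PySem.List.nodup_dedup c)]
  by_cases h : node ∈ c <;> simp [h]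

-- unfolding equations for the two inner loops
lemma innerA_cons (node : Int) (c : List Int) (rest uni cl : List (List Int)) :
    numCommInnerA node (c :: rest) uni cl
      = if node ∈ c then
          (if c ∈ uni then numCommInnerA node rest uni (cl ++ [c]) else (uni ++ [c], cl ++ [c]))
        else numCommInnerA node rest uni cl := rfl

lemma innerB_cons (c : List Int) (j : Int) (rest : List (List Int × Int))
    (seen : PySem.Set Int) (cl : List (List Int)) :
    numCommInnerB ((c, j) :: rest) seen cl
      = if PySem.Set.contains seen j then numCommInnerB rest seen (cl ++ [c])
        else (PySem.Set.add seen j, cl ++ [c]) := rfl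

-- characterisation of B's build loop: canon.get? is the first-occurrence index,
-- index.getD node is the list of (community, id) hits in order
lemma ncBuild_spec (comms : List (List Int)) :
    (∀ c : List Int, (ncBuild comms).1.get? c =
        if c ∈ comms then some (ncId comms c) else none) ∧
    (∀ node : Int, (ncBuild comms).2.getD node [] =
        (comms.filter (fun c => decide (node ∈ c))).map (fun c => (c, ncId comms c))) := by
  induction comms using List.reverseRecOn with
  | nil => constructor <;> intro x <;> simp [ncBuild, PySem.List.enumerate]
  | append_singleton pre c0 ih =>
    have hunf : ncBuild (pre ++ [c0]) =
        (((ncBuild pre).1.setdefault c0 ((pre.length : Int))),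
         (PySem.List.dedup c0).foldl
           (fun d node => d.modify node []
             (· ++ [(c0, (((ncBuild pre).1.get? c0).getD ((pre.length : Int))))])) (ncBuild pre).2) := by
      simp only [ncBuild, PySem.List.enumerate_append, PySem.List.enumerate_cons,
        PySem.List.enumerate_nil, List.foldl_append, List.foldl_cons, List.foldl_nil,
        zero_add]
    have hj : ((ncBuild pre).1.get? c0).getD ((pre.length : Int)) = ncId (pre ++ [c0]) c0 := by
      rw [ih.1 c0]
      by_cases hm : c0 ∈ pre
      · simp [hm, ncId, List.idxOf_append_of_mem hm]
      · simp [hm, ncId, List.idxOf_append_of_notMem hm]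
    constructor
    · intro c
      rw [hunf]
      by_cases hcc : c = c0
      · subst hcc
        by_cases hm : c ∈ pre
        · have hct : (ncBuild pre).1.contains c = true := by
            rw [PySem.Dict.contains_eq_isSome_get?, ih.1 c]; simp [hm]
          rw [PySem.Dict.setdefault_of_contains _ _ hct, ih.1 c]
          simp [hm, ncId, List.idxOf_append_of_mem hm]
        · have hct : (ncBuild pre).1.contains c = false := by
            rw [PySem.Dict.contains_eq_isSome_get?, ih.1 c]; simp [hm]
          rw [PySem.Dict.setdefault_of_not_contains _ _ hct, PySem.Dict.get?_insert_self]
          simp [hm, ncId, List.idxOf_append_of_notMem hm]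
      · have hget : ((ncBuild pre).1.setdefault c0 ((pre.length : Int))).get? c
            = (ncBuild pre).1.get? c := by
          by_cases hc0 : (ncBuild pre).1.contains c0
          · rw [PySem.Dict.setdefault_of_contains _ _ hc0]
          · rw [PySem.Dict.setdefault_of_not_contains _ _ (by simpa using hc0),
              PySem.Dict.get?_insert]
            simp [hcc]
        rw [hget, ih.1 c]
        by_cases hm : c ∈ pre
        · simp [hm, hcc, ncId, List.idxOf_append_of_mem hm]
        · simp [hm, hcc]
    · intro node
      rw [hunf]
      simp only [hj, ncIndex_step, ih.2 node, List.filter_append, List.map_append]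
      congr 1
      · apply List.map_congr_left
        intro c hc
        have hm : c ∈ pre := List.mem_of_mem_filter hc
        simp [ncId, List.idxOf_append_of_mem hm]
      · by_cases hm : node ∈ c0 <;> simp [hm]

-- A's inner loop equals B's inner loop over the (community, id) hits,
-- with B's seen-set tracking A's uni list through the id map
lemma inner_eq (communities : List (List Int)) (node : Int) :
    ∀ (comms : List (List Int)), (∀ c ∈ comms, c ∈ communities) →
    ∀ (uni : List (List Int)), (∀ x ∈ uni, x ∈ communities) →
    ∀ (cl : List (List Int)),
      numCommInnerB ((comms.filter (fun c => decide (node ∈ c))).map (fun c => (c, ncId communities c)))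
          (uni.map (ncId communities)) cl
        = ((numCommInnerA node comms uni cl).1.map (ncId communities),
           (numCommInnerA node comms uni cl).2)
      ∧ (∀ x ∈ (numCommInnerA node comms uni cl).1, x ∈ communities) := by
  intro comms
  induction comms with
  | nil => intro _ uni hu cl; exact ⟨rfl, hu⟩
  | cons c rest ih =>
    intro hsub uni hu cl
    have hc : c ∈ communities := hsub c (by simp)
    have hrest : ∀ x ∈ rest, x ∈ communities := fun x hx => hsub x (by simp [hx])
    rw [innerA_cons, List.filter_cons]
    by_cases hm : node ∈ c
    · have hmem : (PySem.Set.contains (uni.map (ncId communities)) (ncId communities c) = true)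
          ↔ c ∈ uni := by
        rw [PySem.Set.contains_iff]
        constructor
        · intro h
          obtain ⟨x, hx, hfx⟩ := List.mem_map.1 h
          rwa [← ncId_inj communities (hu x hx) hc hfx]
        · intro h; exact List.mem_map_of_mem h
      rw [if_pos hm]
      simp only [hm, decide_true, if_true, List.map_cons]
      rw [innerB_cons]
      by_cases huni : c ∈ uni
      · rw [if_pos (hmem.2 huni), if_pos huni]
        exact ih hrest uni hu (cl ++ [c])
      · have hnotmem : ncId communities c ∉ uni.map (ncId communities) := by
          intro hmm
          exact huni (hmem.1 ((PySem.Set.contains_iff _ _).2 hmm))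
        have hcont : ¬ (PySem.Set.contains (uni.map (ncId communities)) (ncId communities c) = true) := by
          rw [PySem.Set.contains_iff]; exact hnotmem
        rw [if_neg hcont, if_neg huni]
        refine ⟨?_, ?_⟩
        · rw [PySem.Set.add_eq_ite, if_neg hnotmem]
          simp
        · intro x hx
          rcases List.mem_append.1 hx with h | h
          · exact hu x h
          · simp at h; subst h; exact hc
    · rw [if_neg hm]
      simp only [hm, decide_false, if_false, Bool.false_eq_true]
      exact ih hrest uni hu cl

-- ===== VERDICT (by name: the statement is the Claim_ definition above) =====
theorem num_comm_spec : Claim_equal_num_comm := by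
  intro target_comm communities _
  unfold Spec_num_comm num_comm num_comm_alt
  have hloop : ∀ (nodes : List Int) (uni : List (List Int)), (∀ x ∈ uni, x ∈ communities) →
      ∀ (cl : List (List Int)),
      nodes.foldl (fun (st : PySem.Set Int × List (List Int)) node =>
          numCommInnerB ((ncBuild communities).2.getD node []) st.1 st.2)
        (uni.map (ncId communities), cl)
      = (((nodes.foldl (fun (st : List (List Int) × List (List Int)) node =>
            numCommInnerA node communities st.1 st.2) (uni, cl)).1).map (ncId communities),
         (nodes.foldl (fun (st : List (List Int) × List (List Int)) node =>
            numCommInnerA node communities st.1 st.2) (uni, cl)).2)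
      ∧ ∀ x ∈ (nodes.foldl (fun (st : List (List Int) × List (List Int)) node =>
            numCommInnerA node communities st.1 st.2) (uni, cl)).1, x ∈ communities := by
    intro nodes
    induction nodes with
    | nil => intro uni hu cl; exact ⟨rfl, hu⟩
    | cons node rest ih =>
      intro uni hu cl
      have hstep := inner_eq communities node communities (fun _ h => h) uni hu cl
      have hidx := (ncBuild_spec communities).2 node
      simp only [List.foldl_cons, hidx, hstep.1]
      exact ih _ hstep.2 _
  have h := hloop target_comm [] (by simp) []
  simp only [List.map_nil] at h
  dsimp only
  rw [show (PySem.Set.empty : PySem.Set Int) = (([] : List Int)) from rfl, h.1]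
  simp [PySem.Set.len]
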